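-- pv_equiv track=rewrite | github.com/isleym9447/CTS285 | Streamlit/introspectiveimmersion/app.py | calculate_archetype
-- ===== SOURCE A (Python) =====
-- def calculate_archetype(results: dict[str, int]) -> tuple[str, int]:
--     """
--     Calculates the user's primary archetype from the quiz results.
--     """
--     if not results or all(v == 0 for v in results.values()):
--         return ("Citizen Undetermined", 0)
--
--     # Find the archetype with the highest count
--     primary_archetype = max(results, key=results.get)
--     max_score = results[primary_archetype]
--
--     # Check for ties
--     tied_archetypes = [k for k, v in results.items() if v == max_score]
--     if len(tied_archetypes) > 1:
--         # Report the tie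
--         return (f"Tied ({' & '.join(tied_archetypes)})", max_score)
--
--     return (primary_archetype, max_score)
-- ===== SOURCE B (Python) =====
-- def calculate_archetype(results: dict[str, int]) -> tuple[str, int]:
--     """Single pass: running max, its winners (in order) and a nonzero flag."""
--     best = None
--     winners = []
--     any_nonzero = False
--     for k, v in results.items():
--         if v != 0:
--             any_nonzero = True
--         if best is None or v > best:
--             best = v
--             winners = [k]
--         elif v == best:
--             winners.append(k)
--     if not any_nonzero:
--         return ("Citizen Undetermined", 0)
--     if len(winners) > 1:
--         return ("Tied (" + " & ".join(winners) + ")", best)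
--     return (winners[0], best)
-- ===== Notes on version B (the rewrite author's own statement) =====
-- stated objective: alternative
-- what changed: A scans the dict three times (all-zero guard, max over keys with per-key lookups, a tie-collecting comprehension); B makes one pass with a fold that maintains the running max, the list of keys attaining it, and a nonzero flag.
import Mathlib
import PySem

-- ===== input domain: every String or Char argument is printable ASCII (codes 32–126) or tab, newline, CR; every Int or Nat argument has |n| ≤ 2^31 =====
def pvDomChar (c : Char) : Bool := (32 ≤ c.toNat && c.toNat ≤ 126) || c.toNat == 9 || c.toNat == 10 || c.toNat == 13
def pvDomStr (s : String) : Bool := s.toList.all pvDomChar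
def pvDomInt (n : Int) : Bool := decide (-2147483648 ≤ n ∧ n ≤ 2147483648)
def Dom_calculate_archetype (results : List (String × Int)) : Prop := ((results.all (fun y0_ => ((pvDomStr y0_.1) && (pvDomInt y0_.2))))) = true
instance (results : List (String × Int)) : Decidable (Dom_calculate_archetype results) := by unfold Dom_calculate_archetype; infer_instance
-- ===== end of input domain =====

-- B replaces A's three passes (all-zero scan, max-by-lookup, tie scan) by one fold keeping the running max, its winners and a nonzero flag.


-- ===== PORT A =====
def calculate_archetype (results : List (String × Int)) : String × Int :=
  if results.isEmpty || results.all (fun p => p.2 == 0) then ("Citizen Undetermined", 0)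
  else
    -- results.get / results[·]: first-match lookup; exact because a dict's keys are distinct (Pre_)
    match PySem.List.max? (results.map Prod.fst) (fun k => (results.lookup k).getD 0) with
    | none => ("Citizen Undetermined", 0)   -- unreachable: results is nonempty here
    | some primary =>
      let max_score := (results.lookup primary).getD 0
      let tied := (results.filter (fun p => p.2 == max_score)).map Prod.fst
      if tied.length > 1 then ("Tied (" ++ PySem.Str.join " & " tied ++ ")", max_score)
      else (primary, max_score)

-- ===== PORT B =====
-- the loop body of B's single pass: running max, its winners (in order), nonzero flag
def pvStepB (acc : Option Int × List String × Bool) (kv : String × Int) : Option Int × List String × Bool :=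
  let anz := acc.2.2 || kv.2 != 0
  match acc.1 with
  | none => (some kv.2, [kv.1], anz)
  | some b =>
    if b < kv.2 then (some kv.2, [kv.1], anz)
    else if kv.2 == b then (some b, acc.2.1 ++ [kv.1], anz)
    else (some b, acc.2.1, anz)

def calculate_archetype_alt (results : List (String × Int)) : String × Int :=
  let st := results.foldl pvStepB (none, [], false)
  if !st.2.2 then ("Citizen Undetermined", 0)
  else if st.2.1.length > 1 then ("Tied (" ++ PySem.Str.join " & " st.2.1 ++ ")", st.1.getD 0)
  else ((PySem.List.pyGet? st.2.1 0).getD "", st.1.getD 0)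

-- ===== PRECONDITION & SPEC =====
-- Pre_ excludes association lists with duplicate keys: they cannot represent A's dict[str, int] argument,
-- whose keys are distinct by construction.
def Pre_calculate_archetype (results : List (String × Int)) : Prop := (results.map Prod.fst).Nodup
instance (results : List (String × Int)) : Decidable (Pre_calculate_archetype results) := by unfold Pre_calculate_archetype; infer_instance
def pvWitness_calculate_archetype : (List (String × Int)) := [("a", 1), ("b", 2)]
def Spec_calculate_archetype (results : List (String × Int)) (out : String × Int) : Prop := out = calculate_archetype_alt results
instance (results : List (String × Int)) (out : String × Int) : Decidable (Spec_calculate_archetype results out) := by unfold Spec_calculate_archetype; infer_instance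

-- ===== CLAIM (what is proved, stated in full; the proofs are below) =====
def Claim_equal_calculate_archetype : Prop := ∀ (results : List (String × Int)), Dom_calculate_archetype results → Pre_calculate_archetype results → Spec_calculate_archetype results (calculate_archetype results)

-- ===== LEMMAS AND PROOFS =====

-- the first-argmax loop that `max(results, key=results.get)` performs, at the level of pairs
def pvArgmax (p : String × Int) : List (String × Int) → String × Int
  | [] => p
  | x :: t => if p.2 < x.2 then pvArgmax x t else pvArgmax p t

theorem pvArgmax_snd (l : List (String × Int)) (p : String × Int) :
    (pvArgmax p l).2 = l.foldl (fun a x => max a x.2) p.2 := by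
  induction l generalizing p with
  | nil => rfl
  | cons x t ih =>
    simp only [pvArgmax, List.foldl_cons]
    split_ifs with h
    · rw [ih x, max_eq_right h.le]
    · rw [ih p, max_eq_left (by omega)]

theorem pvArgmax_mem (l : List (String × Int)) (p : String × Int) : pvArgmax p l ∈ p :: l := by
  induction l generalizing p with
  | nil => simp [pvArgmax]
  | cons x t ih =>
    simp only [pvArgmax]
    split_ifs with h
    · have := ih x; simp at this ⊢; tauto
    · have := ih p; simp at this ⊢; tauto

theorem pvArgmax_le (l : List (String × Int)) (p : String × Int) : p.2 ≤ (pvArgmax p l).2 := by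
  induction l generalizing p with
  | nil => simp [pvArgmax]
  | cons x t ih =>
    simp only [pvArgmax]
    split_ifs with h
    · exact le_trans h.le (ih x)
    · exact ih p

theorem pvArgmax_eq_self (l : List (String × Int)) (p : String × Int)
    (h : (pvArgmax p l).2 = p.2) : pvArgmax p l = p := by
  induction l generalizing p with
  | nil => rfl
  | cons x t ih =>
    simp only [pvArgmax] at h ⊢
    split_ifs with hc
    · exfalso
      have := pvArgmax_le t x
      rw [if_pos hc] at h; omega
    · rw [if_neg hc] at h; exact ih p h

theorem pvArgmax_filter_head (l : List (String × Int)) (p : String × Int) :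
    ∃ t, (p :: l).filter (fun x => x.2 == (pvArgmax p l).2) = pvArgmax p l :: t := by
  induction l generalizing p with
  | nil => exact ⟨[], by simp [pvArgmax]⟩
  | cons x t ih =>
    simp only [pvArgmax]
    split_ifs with h
    · have hle := pvArgmax_le t x
      obtain ⟨r, hr⟩ := ih x
      refine ⟨r, ?_⟩
      rw [List.filter_cons_of_neg (by simp; omega)]
      exact hr
    · by_cases he : (pvArgmax p t).2 = p.2
      · have hp := pvArgmax_eq_self t p he
        rw [hp]
        refine ⟨(x :: t).filter (fun y => y.2 == p.2), ?_⟩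
        rw [List.filter_cons_of_pos (by simp)]
      · have hle := pvArgmax_le t p
        obtain ⟨r, hr⟩ := ih p
        refine ⟨r, ?_⟩
        rw [List.filter_cons_of_neg (by simp; omega),
            List.filter_cons_of_neg (by simp; omega)]
        rw [List.filter_cons_of_neg (by simp; omega)] at hr
        exact hr

theorem pvLookup (l : List (String × Int)) (p : String × Int)
    (hnd : (l.map Prod.fst).Nodup) (hp : p ∈ l) : l.lookup p.1 = some p.2 := by
  induction l with
  | nil => cases hp
  | cons q r ih =>
    simp only [List.map_cons, List.nodup_cons] at hnd
    rcases List.mem_cons.mp hp with h | h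
    · subst h; simp [List.lookup]
    · have hne : q.1 ≠ p.1 := by
        intro he; exact hnd.1 (he ▸ List.mem_map_of_mem h)
      have hb : (p.1 == q.1) = false := by
        simpa using fun hc : p.1 = q.1 => hne hc.symm
      simp only [List.lookup, hb]
      exact ih hnd.2 h

theorem pvFoldMaxConst (t : List (String × Int)) (c : Int) (h : ∀ y ∈ t, y.2 ≤ c) :
    t.foldl (fun a y => max a y.2) c = c := by
  induction t generalizing c with
  | nil => rfl
  | cons x t ih =>
    simp only [List.foldl_cons, max_eq_left (h x (by simp))]
    exact ih c (fun y hy => h y (by simp [hy]))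

-- port B's fold, characterised: running max, the keys attaining it, and the nonzero flag
theorem pvFoldB (l : List (String × Int)) (b : Int) (ws : List String) (a : Bool) :
    l.foldl pvStepB (some b, ws, a) =
      (some (l.foldl (fun a x => max a x.2) b),
       (if l.any (fun x => decide (b < x.2)) then
          (l.filter (fun x => x.2 == l.foldl (fun a x => max a x.2) b)).map Prod.fst
        else ws ++ (l.filter (fun x => x.2 == b)).map Prod.fst),
       a || l.any (fun x => x.2 != 0)) := by
  induction l generalizing b ws a with
  | nil => simp
  | cons x t ih =>
    have hanz : ((a || (x.2 != 0)) || t.any (fun y => y.2 != 0)) = (a || (x :: t).any (fun y => y.2 != 0)) := by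
      simp [Bool.or_assoc]
    by_cases h1 : b < x.2
    · have hstep : pvStepB (some b, ws, a) x = (some x.2, [x.1], a || (x.2 != 0)) := by
        simp [pvStepB, h1]
      rw [List.foldl_cons, hstep, ih]
      have hB : (x :: t).foldl (fun a y => max a y.2) b = t.foldl (fun a y => max a y.2) x.2 := by
        simp [max_eq_right h1.le]
      have hcond : (x :: t).any (fun y => decide (b < y.2)) = true := by simp; exact Or.inl h1
      rw [hcond]
      by_cases h2 : t.any (fun y => decide (x.2 < y.2))
      · have hlt : x.2 < t.foldl (fun a y => max a y.2) x.2 := by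
          simp only [List.any_eq_true, decide_eq_true_eq] at h2
          obtain ⟨y, hy, hxy⟩ := h2
          exact lt_of_lt_of_le hxy ((PySem.List.le_foldl_max_int t Prod.snd x.2).2 y hy)
        rw [if_pos h2, if_pos rfl]
        refine Prod.ext (by simp [hB]) (Prod.ext ?_ (by simpa using hanz))
        simp only [hB]
        rw [List.filter_cons_of_neg (by simp; omega)]
      · have heq : t.foldl (fun a y => max a y.2) x.2 = x.2 := by
          apply pvFoldMaxConst
          intro y hy
          simp only [List.any_eq_true, decide_eq_true_eq] at h2
          by_contra hc; exact h2 ⟨y, hy, by omega⟩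
        rw [if_neg h2, if_pos rfl]
        refine Prod.ext (by simp [hB]) (Prod.ext ?_ (by simpa using hanz))
        simp only [hB, heq]
        rw [List.filter_cons_of_pos (by simp)]
        simp
    · have hB : (x :: t).foldl (fun a y => max a y.2) b = t.foldl (fun a y => max a y.2) b := by
        simp [max_eq_left (not_lt.mp h1)]
      have hcond : (x :: t).any (fun y => decide (b < y.2)) = t.any (fun y => decide (b < y.2)) := by
        simp [h1]
      by_cases he : x.2 == b
      · have hev : x.2 = b := by simpa using he
        have hstep : pvStepB (some b, ws, a) x = (some b, ws ++ [x.1], a || (x.2 != 0)) := by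
          simp [pvStepB, h1, he]
        rw [List.foldl_cons, hstep, ih, hB, hcond]
        by_cases h2 : t.any (fun y => decide (b < y.2))
        · have hlt : b < t.foldl (fun a y => max a y.2) b := by
            simp only [List.any_eq_true, decide_eq_true_eq] at h2
            obtain ⟨y, hy, hxy⟩ := h2
            exact lt_of_lt_of_le hxy ((PySem.List.le_foldl_max_int t Prod.snd b).2 y hy)
          simp only [if_pos h2]
          refine Prod.ext (by simp) (Prod.ext ?_ (by simpa using hanz))
          simp only []
          rw [List.filter_cons_of_neg (by simp; omega)]
        · simp only [if_neg h2]
          refine Prod.ext (by simp) (Prod.ext ?_ (by simpa using hanz))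
          rw [List.filter_cons_of_pos (by simpa using hev)]
          simp [List.append_assoc]
      · have hlt2 : x.2 < b := by simp at he; omega
        have hstep : pvStepB (some b, ws, a) x = (some b, ws, a || (x.2 != 0)) := by
          simp [pvStepB, h1, he]
        rw [List.foldl_cons, hstep, ih, hB, hcond]
        by_cases h2 : t.any (fun y => decide (b < y.2))
        · have hlt : b < t.foldl (fun a y => max a y.2) b := by
            simp only [List.any_eq_true, decide_eq_true_eq] at h2
            obtain ⟨y, hy, hxy⟩ := h2
            exact lt_of_lt_of_le hxy ((PySem.List.le_foldl_max_int t Prod.snd b).2 y hy)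
          simp only [if_pos h2]
          refine Prod.ext (by simp) (Prod.ext ?_ (by simpa using hanz))
          simp only []
          rw [List.filter_cons_of_neg (by simp; omega)]
        · simp only [if_neg h2]
          refine Prod.ext (by simp) (Prod.ext ?_ (by simpa using hanz))
          simp only []
          rw [List.filter_cons_of_neg (by simp; omega)]

-- A's max?-with-lookup loop merges its first two candidates and recurses: engine for pvMaxA
theorem pvMaxCons2 (f : String → Int) (a b : String) (xs : List String) :
    PySem.List.max? (a :: b :: xs) f = PySem.List.max? ((if f a < f b then b else a) :: xs) f := by
  simp only [PySem.List.max?, List.foldl_cons]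
  split_ifs with h <;> rfl

-- A's max(keys, key=lookup) call returns the first-argmax pair's key
theorem pvMaxA (f : String → Int) (t : List (String × Int)) (x : String × Int)
    (hx : f x.1 = x.2) (ht : ∀ p ∈ t, f p.1 = p.2) :
    PySem.List.max? ((x :: t).map Prod.fst) f = some (pvArgmax x t).1 := by
  induction t generalizing x with
  | nil => simp [PySem.List.max?, pvArgmax]
  | cons y r ih =>
    have hy : f y.1 = y.2 := ht y (by simp)
    simp only [List.map_cons]
    rw [pvMaxCons2, hx, hy]
    have hm : (if x.2 < y.2 then y.1 else x.1) = (if x.2 < y.2 then y else x).1 := by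
      split_ifs <;> rfl
    rw [hm]
    have := ih (if x.2 < y.2 then y else x)
      (by split_ifs with h; exact hy; exact hx)
      (fun p hp => ht p (by simp [hp]))
    simp only [List.map_cons] at this
    rw [this]
    simp only [pvArgmax]
    split_ifs <;> rfl

-- A's all-zero guard is the negation of B's nonzero flag
theorem pvAllZero (l : List (String × Int)) :
    (l.all (fun p => p.2 == 0)) = !(l.any (fun p => p.2 != 0)) := by
  induction l with
  | nil => rfl
  | cons x t ih => simp [ih, bne]

-- ===== VERDICT (by name: the statement is the Claim_ definition above) =====
theorem calculate_archetype_spec : Claim_equal_calculate_archetype := by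
  intro results _ hpre
  unfold Spec_calculate_archetype
  cases results with
  | nil => rfl
  | cons x t =>
    have hf : ∀ p ∈ x :: t, (((x :: t).lookup p.1).getD 0) = p.2 := by
      intro p hp; rw [pvLookup _ p hpre hp]; rfl
    have hq := pvArgmax_mem t x
    set q := pvArgmax x t with hqdef
    have hA : PySem.List.max? ((x :: t).map Prod.fst) (fun k => (((x :: t).lookup k).getD 0)) = some q.1 :=
      pvMaxA _ t x (hf x (by simp)) (fun p hp => hf p (by simp [hp]))
    have hq2 : (((x :: t).lookup q.1).getD 0) = q.2 := hf q hq
    have hM : q.2 = t.foldl (fun a y => max a y.2) x.2 := pvArgmax_snd t x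
    have hBfold : (x :: t).foldl pvStepB (none, [], false)
        = (some (t.foldl (fun a y => max a y.2) x.2),
           (if t.any (fun y => decide (x.2 < y.2)) then
              (t.filter (fun y => y.2 == t.foldl (fun a y => max a y.2) x.2)).map Prod.fst
            else [x.1] ++ (t.filter (fun y => y.2 == x.2)).map Prod.fst),
           (x.2 != 0) || t.any (fun y => y.2 != 0)) := by
      rw [List.foldl_cons, show pvStepB (none, [], false) x = (some x.2, [x.1], (x.2 != 0)) from by simp [pvStepB], pvFoldB]
    have hW : (if t.any (fun y => decide (x.2 < y.2)) then
                  (t.filter (fun y => y.2 == t.foldl (fun a y => max a y.2) x.2)).map Prod.fst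
                else [x.1] ++ (t.filter (fun y => y.2 == x.2)).map Prod.fst)
        = ((x :: t).filter (fun p => p.2 == q.2)).map Prod.fst := by
      by_cases h2 : t.any (fun y => decide (x.2 < y.2))
      · have hlt : x.2 < t.foldl (fun a y => max a y.2) x.2 := by
          simp only [List.any_eq_true, decide_eq_true_eq] at h2
          obtain ⟨y, hy, hxy⟩ := h2
          exact lt_of_lt_of_le hxy ((PySem.List.le_foldl_max_int t Prod.snd x.2).2 y hy)
        rw [if_pos h2, List.filter_cons_of_neg (by simp; omega)]
        rw [hM]
      · have heq : t.foldl (fun a y => max a y.2) x.2 = x.2 := by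
          apply pvFoldMaxConst
          intro y hy
          simp only [List.any_eq_true, decide_eq_true_eq] at h2
          by_contra hc; exact h2 ⟨y, hy, by omega⟩
        rw [if_neg h2, List.filter_cons_of_pos (by simp [hM, heq])]
        simp [hM, heq]
    have hguard : ((x :: t).all (fun p => p.2 == 0)) = !((x.2 != 0) || t.any (fun y => y.2 != 0)) := by
      rw [pvAllZero]
      simp
    by_cases hz : (x :: t).all (fun p => p.2 == 0)
    · have hzB : ((x.2 != 0) || t.any (fun y => y.2 != 0)) = false := by
        cases he : ((x.2 != 0) || t.any (fun y => y.2 != 0)) with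
        | false => rfl
        | true => rw [hguard, he] at hz; simp at hz
      rw [show calculate_archetype (x :: t) = ("Citizen Undetermined", 0) from by
            unfold calculate_archetype
            rw [if_pos (by simp only [List.isEmpty_cons, Bool.false_or]; exact hz)]]
      unfold calculate_archetype_alt
      rw [hBfold]
      simp [hzB]
    · have hzB : ((x.2 != 0) || t.any (fun y => y.2 != 0)) = true := by
        cases he : ((x.2 != 0) || t.any (fun y => y.2 != 0)) with
        | true => rfl
        | false => exact absurd (by rw [hguard, he]; rfl) hz
      rw [← hM] at hBfold hW
      unfold calculate_archetype calculate_archetype_alt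
      rw [if_neg (by simp only [List.isEmpty_cons, Bool.false_or]; exact hz), hBfold]
      simp only [hA, hq2, hzB, Bool.not_true, Bool.false_eq_true, if_false, hW, Option.getD_some]
      set tied := ((x :: t).filter (fun p => p.2 == q.2)).map Prod.fst with htied
      by_cases hlen : tied.length > 1
      · rw [if_pos hlen, if_pos hlen]
      · rw [if_neg hlen, if_neg hlen]
        obtain ⟨r, hr⟩ := pvArgmax_filter_head t x
        have : tied = q.1 :: r.map Prod.fst := by
          rw [htied, ← hqdef] at *
          rw [show ((x :: t).filter (fun p => p.2 == q.2)) = q :: r from hr]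
          rfl
        rw [this]
        have hget : PySem.List.pyGet? (q.1 :: List.map Prod.fst r) 0 = some q.1 := by
          rw [show ((0 : Int)) = ((0 : Nat) : Int) from rfl, PySem.List.pyGet?_natCast]
          simp
        rw [hget]
        simp
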